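-- pv_equiv track=rewrite | github.com/ale-mateus/Algo-Greedy_Project | program2.py | program2
-- ===== SOURCE A (Python) =====
-- from typing import List, Tuple
--
-- def program2(n: int, k: int, values: List[int]) -> Tuple[int, List[int]]:
--     """
--     Greedy solution to Program 2 (S2: unimodal values)
--
--     Parameters:
--     n (int): number of vaults
--     k (int): no two chosen vaults are within k positions of each other
--     values (List[int]): the values of the vaults
--
--     Returns:
--     int:  maximal total value (approx greedy result)
--     List[int]: the indices of the chosen vaults (1-indexed)
--     """
--
--     ############################
--     # Greedy algorithm implementation
--
--     remainingVaults = list(range(n))  # all vaults are initially available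
--     chosenVaults = []  # list of chosen vault indices (1-indexed)
--
--     while remainingVaults:
--         # Compare the first and last remaining vaults based on their values
--         if values[remainingVaults[0]] >= values[remainingVaults[-1]]:
--             i = remainingVaults[0]
--         else:
--             i = remainingVaults[-1]
--
--         # Choose this vault (convert to 1-indexed)
--         chosenVaults.append(i + 1)
--
--         # Remove all vaults within k distance (inclusive)
--         to_remove = set(range(max(0, i - k), min(n, i + k + 1)))
--         remainingVaults = [v for v in remainingVaults if v not in to_remove]
--
--     # Sort chosen vaults in ascending order
--     chosenVaults.sort()
--
--     # Calculate total value
--     total = sum(values[idx - 1] for idx in chosenVaults)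
--
--     return total, chosenVaults
-- ===== SOURCE B (Python) =====
-- from typing import List, Tuple
--
-- def program2(n: int, k: int, values: List[int]) -> Tuple[int, List[int]]:
--     # Two-pointer version: the remaining vaults always form a contiguous
--     # interval [lo, hi]; picking an endpoint shrinks it by k+1 on that side.
--     lo, hi = 0, n - 1
--     left: List[int] = []
--     right: List[int] = []
--     total = 0
--     while lo <= hi:
--         if values[lo] >= values[hi]:
--             total += values[lo]
--             left.append(lo + 1)
--             lo += k + 1
--         else:
--             total += values[hi]
--             right.append(hi + 1)
--             hi -= k + 1
--     right.reverse()
--     return total, left + right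
-- ===== Notes on version B (the rewrite author's own statement) =====
-- stated objective: faster
-- what changed: B replaces A's explicit remaining-vault list (rebuilt by a filter over a set on every pick, then a final sort and re-indexing sum) with a two-pointer interval [lo,hi] that shrinks by k+1 on the picked side, accumulating the total and the chosen indices in sorted order (left picks ascending, right picks reversed) with no list rebuilding and no sort.
import Mathlib
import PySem

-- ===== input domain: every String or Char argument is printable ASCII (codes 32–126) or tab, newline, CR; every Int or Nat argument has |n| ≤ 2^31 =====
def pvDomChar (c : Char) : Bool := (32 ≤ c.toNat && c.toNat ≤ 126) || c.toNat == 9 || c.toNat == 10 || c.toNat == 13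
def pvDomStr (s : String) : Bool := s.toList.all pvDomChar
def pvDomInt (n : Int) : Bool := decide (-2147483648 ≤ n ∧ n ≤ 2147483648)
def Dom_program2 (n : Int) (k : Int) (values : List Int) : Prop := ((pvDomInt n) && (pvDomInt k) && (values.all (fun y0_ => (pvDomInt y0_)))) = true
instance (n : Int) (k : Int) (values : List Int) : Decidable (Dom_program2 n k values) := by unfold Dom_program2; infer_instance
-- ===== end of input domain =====

-- B replaces A's repeatedly-filtered remaining list + final sort by a two-pointer
-- interval shrink accumulating the answer in sorted order (objective: faster).

-- ===== PORT A =====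
-- The while loop of A, as fuel recursion (fuel = initial list length + 1 suffices:
-- inside Pre_ each iteration removes at least the picked vault).
-- values[i] is ported as pyGetD values i 0: inside Pre_ every index read is in range
-- (Python would raise IndexError exactly on the inputs Pre_ excludes).
def loopA (values : List Int) (n : Int) (k : Int) : Nat → List Int → List Int → List Int
  | 0, _, chosen => chosen
  | fuel + 1, rem, chosen =>
    match h : rem with
    | [] => chosen
    | r0 :: rs =>
      -- if values[rem[0]] >= values[rem[-1]]: i = rem[0] else i = rem[-1]
      let i := if PySem.List.pyGetD values r0 0 ≥
                  PySem.List.pyGetD values ((r0 :: rs).getLast (by simp)) 0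
               then r0 else (r0 :: rs).getLast (by simp)
      -- to_remove = set(range(max(0, i-k), min(n, i+k+1)))
      let toRemove := PySem.Set.ofList (PySem.List.pyRange (max 0 (i - k)) (min n (i + k + 1)) 1)
      let rem' := (r0 :: rs).filter (fun v => !(decide (v ∈ toRemove)))
      loopA values n k fuel rem' (chosen ++ [i + 1])

def program2 (n : Int) (k : Int) (values : List Int) : Int × List Int :=
  let remainingVaults := PySem.List.pyRange 0 n 1
  let chosen := loopA values n k (remainingVaults.length + 1) remainingVaults []
  let chosenS := PySem.List.sorted chosen (fun x => x) false
  let total := chosenS.foldl (fun acc idx => acc + PySem.List.pyGetD values (idx - 1) 0) 0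
  (total, chosenS)

-- ===== PORT B =====
-- The while loop of B: two pointers lo, hi; left picks ascending, right picks
-- descending (reversed at the end).  Same fuel convention as loopA.
def loopB (values : List Int) (k : Int) : Nat → Int → Int → Int → List Int → List Int → Int × List Int × List Int
  | 0, _, _, total, left, right => (total, left, right)
  | fuel + 1, lo, hi, total, left, right =>
    if lo ≤ hi then
      if PySem.List.pyGetD values lo 0 ≥ PySem.List.pyGetD values hi 0 then
        loopB values k fuel (lo + (k + 1)) hi (total + PySem.List.pyGetD values lo 0) (left ++ [lo + 1]) right
      else
        loopB values k fuel lo (hi - (k + 1)) (total + PySem.List.pyGetD values hi 0) left (right ++ [hi + 1])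
    else (total, left, right)

def program2_alt (n : Int) (k : Int) (values : List Int) : Int × List Int :=
  let p := loopB values k (n.toNat + 1) 0 (n - 1) 0 [] []
  (p.1, p.2.1 ++ p.2.2.reverse)

-- ===== PRECONDITION & SPEC =====
-- Pre_ excludes exactly the inputs where Python A does not return: with 0 < n,
-- A raises IndexError when n > len(values) and loops forever when k < 0 (the
-- removal window is then empty, so the picked vault is never removed).
def Pre_program2 (n : Int) (k : Int) (values : List Int) : Prop :=
  0 < n → (n ≤ (values.length : Int) ∧ 0 ≤ k)
instance (n : Int) (k : Int) (values : List Int) : Decidable (Pre_program2 n k values) := by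
  unfold Pre_program2; infer_instance

def pvWitness_program2 : Int × Int × List Int := (3, 1, [5, 2, 7])

def Spec_program2 (n : Int) (k : Int) (values : List Int) (out : Int × List Int) : Prop := out = program2_alt n k values
instance (n : Int) (k : Int) (values : List Int) (out : Int × List Int) : Decidable (Spec_program2 n k values out) := by unfold Spec_program2; infer_instance

-- ===== CLAIM (what is proved, stated in full; the proofs are below) =====
def Claim_equal_program2 : Prop := ∀ (n : Int) (k : Int) (values : List Int), Dom_program2 n k values → Pre_program2 n k values → Spec_program2 n k values (program2 n k values)

-- ===== LEMMAS AND PROOFS =====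

-- accumulator lemma for loopA
theorem loopA_acc (values : List Int) (n k : Int) :
    ∀ (fuel : Nat) (rem c : List Int),
      loopA values n k fuel rem c = c ++ loopA values n k fuel rem [] := by
  intro fuel
  induction fuel with
  | zero => intro rem c; simp [loopA]
  | succ f ih =>
    intro rem c
    cases rem with
    | nil => simp [loopA]
    | cons r0 rs =>
      simp only [loopA]
      rw [ih _ (c ++ _), ih _ ([] ++ _)]
      simp

-- accumulator lemma for loopB
theorem loopB_acc (values : List Int) (k : Int) :
    ∀ (fuel : Nat) (lo hi t : Int) (l r : List Int),
      loopB values k fuel lo hi t l r =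
        (t + (loopB values k fuel lo hi 0 [] []).1,
         l ++ (loopB values k fuel lo hi 0 [] []).2.1,
         r ++ (loopB values k fuel lo hi 0 [] []).2.2) := by
  intro fuel
  induction fuel with
  | zero => intro lo hi t l r; simp [loopB]
  | succ f ih =>
    intro lo hi t l r
    simp only [loopB]
    by_cases h1 : lo ≤ hi
    · simp only [if_pos h1]
      by_cases h2 : PySem.List.pyGetD values lo 0 ≥ PySem.List.pyGetD values hi 0
      · simp only [if_pos h2]
        rw [ih (lo + (k + 1)) hi (t + PySem.List.pyGetD values lo 0) (l ++ [lo + 1]) r,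
            ih (lo + (k + 1)) hi (0 + PySem.List.pyGetD values lo 0) ([] ++ [lo + 1]) []]
        simp only [Prod.mk.injEq]
        exact ⟨by ring, by simp, by simp⟩
      · simp only [if_neg h2]
        rw [ih lo (hi - (k + 1)) (t + PySem.List.pyGetD values hi 0) l (r ++ [hi + 1]),
            ih lo (hi - (k + 1)) (0 + PySem.List.pyGetD values hi 0) [] ([] ++ [hi + 1])]
        simp only [Prod.mk.injEq]
        exact ⟨by ring, by simp, by simp⟩
    · simp [if_neg h1]

-- filter of a contiguous range by "keep the v ≥ a" is a range
theorem filter_range_ge (a : Int) : ∀ (m : Nat) (lo b : Int), (b - lo).toNat ≤ m →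
    (PySem.List.pyRange lo b 1).filter (fun v => decide (a ≤ v)) =
      PySem.List.pyRange (max lo a) b 1 := by
  intro m
  induction m with
  | zero =>
    intro lo b h
    rw [PySem.List.pyRange_one_eq_nil (by omega), PySem.List.pyRange_one_eq_nil (by omega)]
    simp
  | succ m ih =>
    intro lo b h
    by_cases hlt : lo < b
    · rw [PySem.List.pyRange_one_cons hlt]
      by_cases ha : a ≤ lo
      · have : max lo a = lo := by omega
        rw [this, PySem.List.pyRange_one_cons hlt]
        simp only [List.filter_cons, decide_eq_true ha, ih (lo+1) b (by omega)]
        have : max (lo + 1) a = lo + 1 := by omega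
        simp [this]
      · simp only [List.filter_cons]
        have : (decide (a ≤ lo)) = false := by simp; omega
        rw [this]
        simp only [Bool.false_eq_true, if_false, ih (lo+1) b (by omega)]
        have h1 : max (lo + 1) a = a := by omega
        have h2 : max lo a = a := by omega
        rw [h1, h2]
    · rw [PySem.List.pyRange_one_eq_nil (by omega), PySem.List.pyRange_one_eq_nil (by omega)]
      simp

-- filter of a contiguous range by "keep the v < b'" is a range
theorem filter_range_lt (b' : Int) : ∀ (m : Nat) (lo b : Int), (b - lo).toNat ≤ m →
    (PySem.List.pyRange lo b 1).filter (fun v => decide (v < b')) =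
      PySem.List.pyRange lo (min b b') 1 := by
  intro m
  induction m with
  | zero =>
    intro lo b h
    rw [PySem.List.pyRange_one_eq_nil (by omega), PySem.List.pyRange_one_eq_nil (by omega)]
    simp
  | succ m ih =>
    intro lo b h
    by_cases hlt : lo < b
    · rw [PySem.List.pyRange_one_cons hlt]
      by_cases hb : lo < b'
      · have hmin : lo < min b b' := by omega
        rw [PySem.List.pyRange_one_cons hmin]
        simp only [List.filter_cons, decide_eq_true hb, if_true]
        rw [ih (lo+1) b (by omega)]
      · simp only [List.filter_cons]
        have hdf : (decide (lo < b')) = false := by simp; omega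
        rw [hdf]
        simp only [Bool.false_eq_true, if_false]
        rw [ih (lo+1) b (by omega)]
        have h1 : min (b : Int) b' = min b b' := rfl
        have h2 : min b b' ≤ lo + 1 := by omega
        have h3 : min b b' ≤ lo := by omega
        rw [PySem.List.pyRange_one_eq_nil h2, PySem.List.pyRange_one_eq_nil h3]
    · rw [PySem.List.pyRange_one_eq_nil (by omega), PySem.List.pyRange_one_eq_nil (by omega)]
      simp

theorem getLast_pyRange (lo hi : Int) (h : lo ≤ hi) (hne) :
    (PySem.List.pyRange lo (hi + 1) 1).getLast hne = hi := by
  rw [List.getLast_congr _ (by simp) (PySem.List.pyRange_one_succ_right h)]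
  exact List.getLast_append_singleton _

-- the synced main induction: loopA on the range [lo, hi] vs loopB on (lo, hi)
theorem main_lemma (values : List Int) (n k : Int) (hk : 0 ≤ k) :
    ∀ (m : Nat) (lo hi : Int) (fa fb : Nat), 0 ≤ lo → hi < n →
      (hi + 1 - lo).toNat ≤ m → (hi + 1 - lo).toNat ≤ fa → (hi + 1 - lo).toNat ≤ fb →
      (loopA values n k fa (PySem.List.pyRange lo (hi + 1) 1) []).Perm
          ((loopB values k fb lo hi 0 [] []).2.1 ++ (loopB values k fb lo hi 0 [] []).2.2.reverse) ∧
      ((loopB values k fb lo hi 0 [] []).2.1 ++ (loopB values k fb lo hi 0 [] []).2.2.reverse).Pairwise (· < ·) ∧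
      (∀ x ∈ (loopB values k fb lo hi 0 [] []).2.1 ++ (loopB values k fb lo hi 0 [] []).2.2.reverse,
        lo + 1 ≤ x ∧ x ≤ hi + 1) ∧
      (loopB values k fb lo hi 0 [] []).1 =
        (((loopB values k fb lo hi 0 [] []).2.1 ++ (loopB values k fb lo hi 0 [] []).2.2.reverse).map
          (fun idx => PySem.List.pyGetD values (idx - 1) 0)).sum := by
  intro m
  induction m with
  | zero =>
    intro lo hi fa fb h0 hn hm _ _
    rw [PySem.List.pyRange_one_eq_nil (by omega)]
    have ha : loopA values n k fa [] [] = [] := by cases fa <;> simp [loopA]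
    have hnle : ¬ lo ≤ hi := by omega
    have hb : loopB values k fb lo hi 0 [] [] = (0, [], []) := by
      cases fb <;> simp [loopB, hnle]
    rw [ha, hb]; simp
  | succ m ih =>
    intro lo hi fa fb h0 hn hm hfa hfb
    by_cases hle : lo ≤ hi
    · -- both loops take a step
      obtain ⟨fa', rfl⟩ : ∃ fa', fa = fa' + 1 := ⟨fa - 1, by omega⟩
      obtain ⟨fb', rfl⟩ : ∃ fb', fb = fb' + 1 := ⟨fb - 1, by omega⟩
      have hcons := PySem.List.pyRange_one_cons (show lo < hi + 1 by omega)
      have hlast : ∀ hne, (PySem.List.pyRange lo (hi + 1) 1).getLast hne = hi :=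
        fun hne => getLast_pyRange lo hi hle hne
      rw [hcons]
      simp only [loopA, loopB]
      have hlast' : ∀ hne, (lo :: PySem.List.pyRange (lo + 1) (hi + 1) 1).getLast hne = hi := by
        intro hne
        exact (List.getLast_congr hne (by rw [hcons]; simp) hcons.symm).trans (hlast _)
      rw [hlast', if_pos hle]
      by_cases hcond : PySem.List.pyGetD values lo 0 ≥ PySem.List.pyGetD values hi 0
      · -- pick lo
        rw [if_pos hcond, if_pos hcond]
        have hfilter :
            (lo :: PySem.List.pyRange (lo + 1) (hi + 1) 1).filter
              (fun v => !(decide (v ∈ PySem.Set.ofList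
                  (PySem.List.pyRange (max 0 (lo - k)) (min n (lo + k + 1)) 1)))) =
              PySem.List.pyRange (lo + (k + 1)) (hi + 1) 1 := by
          rw [← hcons]
          have hcg : ∀ v ∈ PySem.List.pyRange lo (hi + 1) 1,
              (!(decide (v ∈ PySem.Set.ofList
                  (PySem.List.pyRange (max 0 (lo - k)) (min n (lo + k + 1)) 1)))) =
              decide (lo + (k + 1) ≤ v) := by
            intro v hv
            rw [PySem.List.mem_pyRange_one] at hv
            simp only [PySem.Set.mem_ofList, PySem.List.mem_pyRange_one]
            by_cases hP : max 0 (lo - k) ≤ v ∧ v < min n (lo + k + 1)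
            · rw [decide_eq_true hP, decide_eq_false (show ¬ lo + (k + 1) ≤ v by omega)]; rfl
            · rw [decide_eq_false hP, decide_eq_true (show lo + (k + 1) ≤ v by omega)]; rfl
          rw [List.filter_congr hcg,
              filter_range_ge (lo + (k + 1)) (hi + 1 - lo).toNat lo (hi + 1) (by omega)]
          have : max lo (lo + (k + 1)) = lo + (k + 1) := by omega
          rw [this]
        rw [hfilter, loopA_acc, loopB_acc]
        have hstep : (hi + 1 - (lo + (k + 1))).toNat ≤ m := by omega
        obtain ⟨hperm, hpair, hbnd, hsum⟩ :=
          ih (lo + (k + 1)) hi fa' fb' (by omega) hn hstep (by omega) (by omega)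
        set q := loopB values k fb' (lo + (k + 1)) hi 0 [] [] with hq
        simp only [List.nil_append, List.cons_append]
        refine ⟨?_, ?_, ?_, ?_⟩
        · exact hperm.cons (lo + 1)
        · rw [List.pairwise_cons]
          exact ⟨fun x hx => by have := hbnd x hx; omega, hpair⟩
        · intro x hx
          rcases List.mem_cons.mp hx with rfl | hx
          · omega
          · have := hbnd x hx; omega
        · simp only [List.map_cons, List.sum_cons]
          rw [hsum]
          have h1 : lo + 1 - 1 = lo := by ring
          rw [h1]; ring
      · -- pick hi
        rw [if_neg hcond, if_neg hcond]
        have hfilter :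
            (lo :: PySem.List.pyRange (lo + 1) (hi + 1) 1).filter
              (fun v => !(decide (v ∈ PySem.Set.ofList
                  (PySem.List.pyRange (max 0 (hi - k)) (min n (hi + k + 1)) 1)))) =
              PySem.List.pyRange lo (hi - (k + 1) + 1) 1 := by
          rw [← hcons]
          have hcg : ∀ v ∈ PySem.List.pyRange lo (hi + 1) 1,
              (!(decide (v ∈ PySem.Set.ofList
                  (PySem.List.pyRange (max 0 (hi - k)) (min n (hi + k + 1)) 1)))) =
              decide (v < hi - k) := by
            intro v hv
            rw [PySem.List.mem_pyRange_one] at hv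
            simp only [PySem.Set.mem_ofList, PySem.List.mem_pyRange_one]
            by_cases hP : max 0 (hi - k) ≤ v ∧ v < min n (hi + k + 1)
            · rw [decide_eq_true hP, decide_eq_false (show ¬ v < hi - k by omega)]; rfl
            · rw [decide_eq_false hP, decide_eq_true (show v < hi - k by omega)]; rfl
          rw [List.filter_congr hcg,
              filter_range_lt (hi - k) (hi + 1 - lo).toNat lo (hi + 1) (by omega)]
          have : min (hi + 1) (hi - k) = hi - (k + 1) + 1 := by omega
          rw [this]
        rw [hfilter, loopA_acc, loopB_acc]
        have hstep : (hi - (k + 1) + 1 - lo).toNat ≤ m := by omega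
        obtain ⟨hperm, hpair, hbnd, hsum⟩ :=
          ih lo (hi - (k + 1)) fa' fb' h0 (by omega) hstep (by omega) (by omega)
        set q := loopB values k fb' lo (hi - (k + 1)) 0 [] [] with hq
        simp only [List.nil_append, List.cons_append, List.reverse_cons,
          ← List.append_assoc]
        refine ⟨?_, ?_, ?_, ?_⟩
        · refine (hperm.cons (hi + 1)).trans ?_
          exact (List.perm_append_singleton _ _).symm
        · rw [List.pairwise_append]
          refine ⟨hpair, List.pairwise_singleton _ _, ?_⟩
          intro x hx y hy
          rw [List.mem_singleton] at hy
          subst hy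
          have := hbnd x hx; omega
        · intro x hx
          rcases List.mem_append.mp hx with hx | hx
          · have := hbnd x hx; omega
          · rw [List.mem_singleton] at hx; subst hx; omega
        · simp only [List.map_append, List.sum_append, List.map_cons, List.sum_cons,
            List.map_nil, List.sum_nil]
          rw [hsum, List.map_append, List.sum_append]
          have h1 : hi + 1 - 1 = hi := by ring
          rw [h1]; ring
    · -- empty interval: both loops stop
      rw [PySem.List.pyRange_one_eq_nil (by omega)]
      have ha : loopA values n k fa [] [] = [] := by cases fa <;> simp [loopA]
      have hb : loopB values k fb lo hi 0 [] [] = (0, [], []) := by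
        cases fb <;> simp [loopB, hle]
      rw [ha, hb]; simp

-- ===== VERDICT (by name: the statement is the Claim_ definition above) =====
theorem program2_spec : Claim_equal_program2 := by
  intro n k values _ hpre
  unfold Spec_program2
  simp only [program2, program2_alt]
  by_cases hn : 0 < n
  · obtain ⟨_, hk⟩ := hpre hn
    have hfa : (PySem.List.pyRange 0 n 1).length + 1 = n.toNat + 1 := by
      rw [PySem.List.length_pyRange_one]; omega
    have heq : n - 1 + 1 = n := by omega
    have hb : (n - 1 + 1 - 0).toNat ≤ n.toNat + 1 := by omega
    have := main_lemma values n k hk n.toNat 0 (n - 1) (n.toNat + 1) (n.toNat + 1)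
      le_rfl (by omega) (by omega) (by omega) (by omega)
    rw [heq] at this
    obtain ⟨hperm, hpair, _, hsum⟩ := this
    rw [hfa]
    have hsorted := PySem.List.sorted_eq_of_perm_of_pairwise_lt _ _
      (fun (x : Int) => x) hperm.symm (by simpa using hpair)
    rw [hsorted]
    refine Prod.ext ?_ rfl
    simp only
    rw [PySem.List.foldl_add _ (fun idx => PySem.List.pyGetD values (idx - 1) 0) 0, hsum]
    simp
  · -- n ≤ 0: both return (0, [])
    have hr : PySem.List.pyRange 0 n 1 = [] := PySem.List.pyRange_one_eq_nil (by omega)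
    have hb : loopB values k (n.toNat + 1) 0 (n - 1) 0 [] [] = (0, [], []) := by
      have h2 : ¬ (0 : Int) ≤ n - 1 := by omega
      simp only [loopB, if_neg h2]
    rw [hr, hb]
    simp [loopA, PySem.List.sorted]
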